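-- pv_equiv track=rewrite | github.com/BrodatySzogunik/Niduc | B8ZSScrambler.py | B8ZSScrambler
-- ===== SOURCE A (Python) =====
-- def B8ZSScrambler(array, lastSymbol):
--     consecZero = 0
--     table = {
--         "1": [0, 0, 0, 1, -1, 0, -1, 1],
--         "-1": [0, 0, 0, -1, 1, 0, 1, -1]
--     }
--
--     for i in range(0,len(array)):
--         if array[i] == 1:
--             lastSymbol = 1
--             consecZero = 0
--
--         elif array[i] == -1:
--             lastSymbol = -1
--             consecZero = 0
--
--         elif array[i] == 0:
--             consecZero += 1
--
--             if consecZero == 8: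
--                 array = array[0:i - 7] + table[str(lastSymbol)] + array[i + 1:]
--                 consecZero = 0
--     return array
-- ===== SOURCE B (Python) =====
-- def B8ZSScrambler(array, lastSymbol):
--     table = {
--         "1": [0, 0, 0, 1, -1, 0, -1, 1],
--         "-1": [0, 0, 0, -1, 1, 0, 1, -1]
--     }
--     # pass 1: detect substitution sites (end index, last symbol seen before the run)
--     events = []
--     consecZero = 0
--     sym = lastSymbol
--     for i, v in enumerate(array):
--         if v == 1 or v == -1:
--             sym = v
--             consecZero = 0
--         elif v == 0:
--             consecZero += 1
--             if consecZero == 8: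
--                 events.append((i, sym))
--                 consecZero = 0
--     # pass 2: apply the substitutions to a copy
--     out = list(array)
--     for end, s in events:
--         out[end - 7:end + 1] = table[str(s)]
--     return out
-- ===== Notes on version B (the rewrite author's own statement) =====
-- stated objective: alternative
-- what changed: A rebuilds the array by slicing inside the scan each time 8 zeros accumulate; B separates the work into a detection pass that only records (end index, last symbol) events and a second pass that writes the 8-element patterns into a copy of the input via slice assignment.
import Mathlib
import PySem

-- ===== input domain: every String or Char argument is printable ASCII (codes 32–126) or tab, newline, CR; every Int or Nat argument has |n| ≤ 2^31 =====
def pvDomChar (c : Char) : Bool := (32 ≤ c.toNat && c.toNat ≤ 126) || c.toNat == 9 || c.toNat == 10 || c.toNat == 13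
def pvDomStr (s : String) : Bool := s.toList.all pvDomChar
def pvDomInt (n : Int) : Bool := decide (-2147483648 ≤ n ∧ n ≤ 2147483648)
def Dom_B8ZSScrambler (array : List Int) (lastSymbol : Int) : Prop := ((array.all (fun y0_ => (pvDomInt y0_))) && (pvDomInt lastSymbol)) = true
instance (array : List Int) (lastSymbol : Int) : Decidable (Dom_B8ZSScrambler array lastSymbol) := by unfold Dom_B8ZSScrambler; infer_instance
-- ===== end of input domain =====

-- B8ZS scrambler: B separates detection of 8-zero substitution sites (recorded as events) from
-- applying the patterns to a copy in a second pass, instead of A's rebuild-by-slicing inside the scan.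


-- the substitution table shared by both Python versions
def pvTable : PySem.Dict String (List Int) :=
  PySem.Dict.mk [("1", [0, 0, 0, 1, -1, 0, -1, 1]), ("-1", [0, 0, 0, -1, 1, 0, 1, -1])]

-- ===== PORT A =====
-- one iteration of A's for-loop; state = (array, lastSymbol, consecZero)
def pvStepA (st : List Int × Int × Int) (i : Int) : List Int × Int × Int :=
  match PySem.List.pyGet? st.1 i with
  | some v =>
    if v = 1 then (st.1, 1, 0)
    else if v = -1 then (st.1, -1, 0)
    else if v = 0 then
      if st.2.2 + 1 = 8 then
        match PySem.Dict.get? pvTable (PySem.Int.toStr st.2.1) with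
        | some p => (PySem.List.slice st.1 (some 0) (some (i - 7)) ++ p ++
                     PySem.List.slice st.1 (some (i + 1)) none, st.2.1, 0)
        | none => (st.1, st.2.1, st.2.2 + 1)   -- KeyError in Python: excluded by Pre_
      else (st.1, st.2.1, st.2.2 + 1)
    else st
  | none => st                                  -- unreachable: i ranges over valid indices

def B8ZSScrambler (array : List Int) (lastSymbol : Int) : List Int :=
  ((PySem.List.pyRange 0 (PySem.List.len array) 1).foldl pvStepA (array, lastSymbol, 0)).1

-- ===== PORT B =====
-- pass 1 step: state = (events, sym, consecZero)
def pvDetStep (st : List (Int × Int) × Int × Int) (p : Int × Int) : List (Int × Int) × Int × Int :=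
  if p.2 = 1 ∨ p.2 = -1 then (st.1, p.2, 0)
  else if p.2 = 0 then
    if st.2.2 + 1 = 8 then (st.1 ++ [(p.1, st.2.1)], st.2.1, 0)
    else (st.1, st.2.1, st.2.2 + 1)
  else st

-- pass 2 step: out[end-7:end+1] = table[str(s)]
def pvApply (out : List Int) (e : Int × Int) : List Int :=
  match PySem.Dict.get? pvTable (PySem.Int.toStr e.2) with
  | some p => PySem.List.slice out (some 0) (some (e.1 - 7)) ++ p ++
              PySem.List.slice out (some (e.1 + 1)) none
  | none => out                                 -- KeyError in Python: excluded by Pre_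

def B8ZSScrambler_alt (array : List Int) (lastSymbol : Int) : List Int :=
  (((PySem.List.enumerate array 0).foldl pvDetStep ([], lastSymbol, 0)).1).foldl pvApply array

-- ===== PRECONDITION & SPEC =====
def pvNZ (x : Int) : Bool := decide (x ≠ 1 ∧ x ≠ -1)

-- Pre_ excludes exactly the inputs where both Pythons raise KeyError: lastSymbol is neither 1 nor -1
-- and an eighth zero is scanned before any 1/-1 occurs in the array.
def Pre_B8ZSScrambler (array : List Int) (lastSymbol : Int) : Prop :=
  lastSymbol = 1 ∨ lastSymbol = -1 ∨ (array.takeWhile pvNZ).count 0 < 8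
instance (array : List Int) (lastSymbol : Int) : Decidable (Pre_B8ZSScrambler array lastSymbol) := by
  unfold Pre_B8ZSScrambler; infer_instance

def pvWitness_B8ZSScrambler : List Int × Int := ([0, 0, 0, 0, 0, 0, 0, 0, 1], 1)

def Spec_B8ZSScrambler (array : List Int) (lastSymbol : Int) (out : List Int) : Prop := out = B8ZSScrambler_alt array lastSymbol
instance (array : List Int) (lastSymbol : Int) (out : List Int) : Decidable (Spec_B8ZSScrambler array lastSymbol out) := by unfold Spec_B8ZSScrambler; infer_instance

-- ===== CLAIM (what is proved, stated in full; the proofs are below) =====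
def Claim_equal_B8ZSScrambler : Prop := ∀ (array : List Int) (lastSymbol : Int), Dom_B8ZSScrambler array lastSymbol → Pre_B8ZSScrambler array lastSymbol → Spec_B8ZSScrambler array lastSymbol (B8ZSScrambler array lastSymbol)

-- ===== LEMMAS AND PROOFS =====

-- the slice expression both ports build at an event with end index k, as take/drop
theorem pvSlice_eq (out : List Int) (k : Nat) (p : List Int) (h7 : 7 ≤ k) :
    PySem.List.slice out none (some ((k : Int) - 7)) ++
      (p ++ PySem.List.slice out (some ((k : Int) + 1)) none)
      = out.take (k - 7) ++ (p ++ out.drop (k + 1)) := by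
  have e1 : (k : Int) - 7 = ((k - 7 : Nat) : Int) := by omega
  have e2 : (k : Int) + 1 = ((k + 1 : Nat) : Int) := by omega
  rw [e1, e2, PySem.List.slice_to_natCast, PySem.List.slice_from_natCast]

theorem pvApply_eq (out : List Int) (k : Nat) (s : Int) (p : List Int)
    (h7 : 7 ≤ k) (hp : PySem.Dict.get? pvTable (PySem.Int.toStr s) = some p) :
    pvApply out ((k : Int), s) = out.take (k - 7) ++ p ++ out.drop (k + 1) := by
  simp only [pvApply, hp, PySem.List.slice_zero_start, List.append_assoc]
  exact pvSlice_eq out k p h7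

theorem B8ZSScrambler_main (array : List Int) :
    ∀ (m k : Nat), k + m = array.length →
    ∀ (arr : List Int) (evs : List (Int × Int)) (sym cz : Int),
      arr = evs.foldl pvApply array →
      arr.length = array.length →
      arr.drop k = array.drop k →
      0 ≤ cz → cz ≤ (k : Int) →
      (sym = 1 ∨ sym = -1 ∨ cz + (((array.drop k).takeWhile pvNZ).count 0 : Int) < 8) →
      ((PySem.List.pyRange (k : Int) (array.length : Int) 1).foldl pvStepA (arr, sym, cz)).1
        = (((PySem.List.enumerate (array.drop k) (k : Int)).foldl pvDetStep (evs, sym, cz)).1).foldl pvApply array := by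
  intro m
  induction m with
  | zero =>
    intro k hk arr evs sym cz h1 h2 h3 hcz0 hczk hsym
    have hkl : k = array.length := by omega
    subst hkl
    rw [PySem.List.pyRange_one_eq_nil (by omega), List.drop_length, PySem.List.enumerate_nil]
    exact h1
  | succ m ih =>
    intro k hk arr evs sym cz h1 h2 h3 hcz0 hczk hsym
    have hklt : k < array.length := by omega
    have hdropk : array.drop k = array[k] :: array.drop (k + 1) := List.drop_eq_getElem_cons hklt
    have h3' : arr.drop (k + 1) = array.drop (k + 1) := by
      have := congrArg (List.drop 1) h3
      simpa [List.drop_drop] using this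
    have hget : arr[k]? = array[k]? := by
      have := congrArg (fun l => l[0]?) h3
      simpa [List.getElem?_drop] using this
    have harrk : PySem.List.pyGet? arr ((k : Int)) = some array[k] := by
      rw [PySem.List.pyGet?_natCast, hget, List.getElem?_eq_getElem hklt]
    rw [PySem.List.pyRange_one_cons (by exact_mod_cast hklt), hdropk, PySem.List.enumerate_cons]
    simp only [List.foldl_cons, pvStepA, pvDetStep, harrk]
    by_cases hv1 : array[k] = 1
    · simp only [hv1]
      norm_num
      have := ih (k + 1) (by omega) arr evs 1 0 h1 h2 h3' (by omega) (by omega) (Or.inl rfl)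
      simpa [Nat.cast_add] using this
    · by_cases hvm1 : array[k] = -1
      · simp only [hvm1]
        norm_num
        have := ih (k + 1) (by omega) arr evs (-1) 0 h1 h2 h3' (by omega) (by omega)
          (Or.inr (Or.inl rfl))
        simpa [Nat.cast_add] using this
      · by_cases hv0 : array[k] = 0
        · simp only [hv0]
          norm_num
          by_cases hc8 : cz + 1 = 8
          · -- the eighth zero: the substitution fires, and sym must already be 1 or -1
            have hsym' : sym = 1 ∨ sym = -1 := by
              rcases hsym with h | h | h
              · exact Or.inl h
              · exact Or.inr h
              · exfalso
                rw [hdropk, hv0] at h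
                have hnz : pvNZ (0 : Int) = true := by decide
                simp [hnz] at h
                omega
            have h7k : 7 ≤ k := by omega
            simp only [if_pos hc8]
            rcases hsym' with hs | hs
            · subst hs
              have hp : PySem.Dict.get? pvTable (PySem.Int.toStr (1 : Int))
                  = some [0, 0, 0, 1, -1, 0, -1, 1] := by decide
              simp only [hp]
              rw [pvSlice_eq arr k _ h7k]
              have h1' : arr.take (k - 7) ++ [(0 : Int), 0, 0, 1, -1, 0, -1, 1] ++ arr.drop (k + 1)
                  = (evs ++ [((k : Int), 1)]).foldl pvApply array := by
                rw [List.foldl_append, ← h1, List.foldl_cons, List.foldl_nil,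
                  pvApply_eq arr k 1 _ h7k hp]
              have h2' : (arr.take (k - 7) ++ [(0 : Int), 0, 0, 1, -1, 0, -1, 1]
                  ++ arr.drop (k + 1)).length = array.length := by
                simp [List.length_take, List.length_drop]
                omega
              have hdl : ∀ (X Y : List Int), X.length = k + 1 → (X ++ Y).drop (k + 1) = Y := by
                intro X Y hX
                rw [← hX, List.drop_left]
              have h3'' : (arr.take (k - 7) ++ [(0 : Int), 0, 0, 1, -1, 0, -1, 1]
                  ++ arr.drop (k + 1)).drop (k + 1) = array.drop (k + 1) := by
                have hplen : (arr.take (k - 7) ++ [(0 : Int), 0, 0, 1, -1, 0, -1, 1]).length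
                    = k + 1 := by
                  simp [List.length_take]
                  omega
                exact (hdl _ _ hplen).trans h3'
              have := ih (k + 1) (by omega)
                (arr.take (k - 7) ++ [(0 : Int), 0, 0, 1, -1, 0, -1, 1] ++ arr.drop (k + 1))
                (evs ++ [((k : Int), 1)]) 1 0 h1' h2' h3'' (by omega) (by omega) (Or.inl rfl)
              simpa [Nat.cast_add] using this
            · subst hs
              have hp : PySem.Dict.get? pvTable (PySem.Int.toStr (-1 : Int))
                  = some [0, 0, 0, -1, 1, 0, 1, -1] := by decide
              simp only [hp]
              rw [pvSlice_eq arr k _ h7k]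
              have h1' : arr.take (k - 7) ++ [(0 : Int), 0, 0, -1, 1, 0, 1, -1] ++ arr.drop (k + 1)
                  = (evs ++ [((k : Int), -1)]).foldl pvApply array := by
                rw [List.foldl_append, ← h1, List.foldl_cons, List.foldl_nil,
                  pvApply_eq arr k (-1) _ h7k hp]
              have h2' : (arr.take (k - 7) ++ [(0 : Int), 0, 0, -1, 1, 0, 1, -1]
                  ++ arr.drop (k + 1)).length = array.length := by
                simp [List.length_take, List.length_drop]
                omega
              have hdl : ∀ (X Y : List Int), X.length = k + 1 → (X ++ Y).drop (k + 1) = Y := by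
                intro X Y hX
                rw [← hX, List.drop_left]
              have h3'' : (arr.take (k - 7) ++ [(0 : Int), 0, 0, -1, 1, 0, 1, -1]
                  ++ arr.drop (k + 1)).drop (k + 1) = array.drop (k + 1) := by
                have hplen : (arr.take (k - 7) ++ [(0 : Int), 0, 0, -1, 1, 0, 1, -1]).length
                    = k + 1 := by
                  simp [List.length_take]
                  omega
                exact (hdl _ _ hplen).trans h3'
              have := ih (k + 1) (by omega)
                (arr.take (k - 7) ++ [(0 : Int), 0, 0, -1, 1, 0, 1, -1] ++ arr.drop (k + 1))
                (evs ++ [((k : Int), -1)]) (-1) 0 h1' h2' h3'' (by omega) (by omega)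
                (Or.inr (Or.inl rfl))
              simpa [Nat.cast_add] using this
          · simp only [if_neg hc8]
            have hsym2 : sym = 1 ∨ sym = -1 ∨
                cz + 1 + (((array.drop (k + 1)).takeWhile pvNZ).count 0 : Int) < 8 := by
              rcases hsym with h | h | h
              · exact Or.inl h
              · exact Or.inr (Or.inl h)
              · right; right
                rw [hdropk, hv0] at h
                have hnz : pvNZ (0 : Int) = true := by decide
                simp [hnz] at h
                omega
            have := ih (k + 1) (by omega) arr evs sym (cz + 1) h1 h2 h3' (by omega)
              (by push_cast; omega) hsym2
            simpa [Nat.cast_add] using this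
        · have hd1 : ¬(array[k] = 1 ∨ array[k] = -1) := fun h => h.elim hv1 hvm1
          simp only [if_neg hv1, if_neg hvm1, if_neg hv0, if_neg hd1]
          have hsym2 : sym = 1 ∨ sym = -1 ∨
              cz + (((array.drop (k + 1)).takeWhile pvNZ).count 0 : Int) < 8 := by
            rcases hsym with h | h | h
            · exact Or.inl h
            · exact Or.inr (Or.inl h)
            · right; right
              rw [hdropk] at h
              have hnz : pvNZ array[k] = true := by simp [pvNZ, hv1, hvm1]
              have hv0' : (0 : Int) ≠ array[k] := fun hh => hv0 hh.symm
              simp only [List.takeWhile_cons, hnz, if_true] at h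
              rw [List.count_cons_of_ne hv0] at h
              omega
          have := ih (k + 1) (by omega) arr evs sym cz h1 h2 h3' hcz0 (by push_cast; omega) hsym2
          simpa [Nat.cast_add] using this

-- ===== VERDICT (by name: the statement is the Claim_ definition above) =====
theorem B8ZSScrambler_spec : Claim_equal_B8ZSScrambler := by
  intro array lastSymbol _ hPre
  unfold Spec_B8ZSScrambler B8ZSScrambler B8ZSScrambler_alt
  have hsym : lastSymbol = 1 ∨ lastSymbol = -1 ∨
      (0 : Int) + (((array.drop 0).takeWhile pvNZ).count 0 : Int) < 8 := by
    rcases hPre with h | h | h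
    · exact Or.inl h
    · exact Or.inr (Or.inl h)
    · right; right; simp only [List.drop_zero]; omega
  have h := B8ZSScrambler_main array array.length 0 (by omega) array [] lastSymbol 0 rfl rfl rfl
    (by omega) (by omega) hsym
  simpa [PySem.List.len_eq] using h
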